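-- pv_equiv track=rewrite | github.com/KayatoDQY/Calculator | src.py | process_factorial
-- ===== SOURCE A (Python) =====
-- def process_factorial(expr):
--     if '!' in expr:
--         if len(expr) > 1 and expr[-1] == '!':
--             i = len(expr) - 2
--             while i >= 0 and expr[i].isdigit():
--                 i -= 1
--             if expr[i] == '!':
--                 new_expr = '!' + expr[0:-1]+')'
--                 return new_expr
--         raise ValueError("Invalid expression: " + expr)
--     else:
--         return expr
-- ===== SOURCE B (Python) =====
-- def process_factorial(expr):
--     if '!' not in expr:
--         return expr
--     # single forward pass: ok <=> the trailing digit-run of the prefix scanned so far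
--     # began at the start of the string or immediately after a '!'
--     ok = True
--     for ch in expr[:-1]:
--         ok = True if ch == '!' else (ok and ch.isdigit())
--     if len(expr) > 1 and expr[-1] == '!' and ok:
--         return '!' + expr[:-1] + ')'
--     raise ValueError("Invalid expression: " + expr)
-- ===== Notes on version B (the rewrite author's own statement) =====
-- stated objective: alternative
-- what changed: A validates by scanning backwards from the end with an explicit index loop; B makes one forward pass over the body folding a boolean accumulator (whether the current digit-run began at the start of the string or immediately after a factorial sign) and then tests the final character once.
import Mathlib
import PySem

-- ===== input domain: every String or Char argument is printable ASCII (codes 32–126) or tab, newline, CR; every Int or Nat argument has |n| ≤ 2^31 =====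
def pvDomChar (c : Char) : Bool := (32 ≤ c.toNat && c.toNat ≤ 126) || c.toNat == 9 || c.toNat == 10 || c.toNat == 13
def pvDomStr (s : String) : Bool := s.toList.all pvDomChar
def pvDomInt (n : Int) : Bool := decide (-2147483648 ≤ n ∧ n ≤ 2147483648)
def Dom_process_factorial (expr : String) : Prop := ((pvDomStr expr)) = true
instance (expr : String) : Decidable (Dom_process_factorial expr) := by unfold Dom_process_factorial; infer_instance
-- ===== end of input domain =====

-- A validates by scanning backwards from the end with an index loop; B makes one
-- forward pass over the body folding a boolean accumulator (whether the current
-- digit-run began at the start or right after a factorial sign). Objective: alternative.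
-- A raises ValueError on invalid input; those inputs are excluded by Pre_.

-- ===== PORT A =====
-- the while loop: i -= 1 while i >= 0 and expr[i].isdigit()
def paScan (cs : List Char) (i : Int) : Int :=
  if h : 0 ≤ i ∧ PySem.Chars.isdigit (PySem.List.pyGetD cs i ' ') = true then
    paScan cs (i - 1)
  else i
termination_by (i + 1).toNat
decreasing_by omega

def process_factorial (expr : String) : String :=
  if PySem.Str.isIn "!" expr then
    if 1 < expr.toList.length ∧ PySem.List.pyGetD expr.toList (-1) ' ' = '!' then
      if PySem.List.pyGetD expr.toList
          (paScan expr.toList ((expr.toList.length : Int) - 2)) ' ' = '!' then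
        String.ofList ('!' :: PySem.List.slice expr.toList (some 0) (some (-1)) ++ [')'])
      else ""   -- raise ValueError (excluded by Pre_)
    else ""     -- raise ValueError (excluded by Pre_)
  else expr

-- ===== PORT B =====
-- the forward pass: for ch in expr[:-1]: ok = True if ch == '!' else (ok and ch.isdigit())
def pbStep (ok : Bool) (ch : Char) : Bool :=
  if ch = '!' then true else ok && PySem.Chars.isdigit ch

def process_factorial_alt (expr : String) : String :=
  if PySem.Str.isIn "!" expr = false then expr
  else
    let ok := (PySem.List.slice expr.toList none (some (-1))).foldl pbStep true
    if 1 < expr.toList.length ∧ PySem.List.pyGetD expr.toList (-1) ' ' = '!' ∧ ok = true then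
      String.ofList ('!' :: PySem.List.slice expr.toList none (some (-1)) ++ [')'])
    else ""   -- raise ValueError (excluded by Pre_)

-- ===== PRECONDITION & SPEC =====
-- Pre_ excludes exactly the inputs on which A raises ValueError: expr contains '!' but is
-- not of the valid shape (ends in '!', length > 1, and expr[:-1] minus trailing digits is
-- empty or ends in '!').
def Pre_process_factorial (expr : String) : Prop :=
  PySem.Chars.isIn ['!'] expr.toList = false ∨
    (1 < expr.toList.length ∧ expr.toList.getLast? = some '!' ∧
      (expr.toList.dropLast.reverse.dropWhile (fun c => PySem.Chars.isdigit c) = [] ∨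
       (expr.toList.dropLast.reverse.dropWhile (fun c => PySem.Chars.isdigit c)).head?
          = some '!'))
instance (expr : String) : Decidable (Pre_process_factorial expr) := by
  unfold Pre_process_factorial; infer_instance

def pvWitness_process_factorial : String := "3!"

def Spec_process_factorial (expr : String) (out : String) : Prop := out = process_factorial_alt expr
instance (expr : String) (out : String) : Decidable (Spec_process_factorial expr out) := by unfold Spec_process_factorial; infer_instance

-- ===== CLAIM (what is proved, stated in full; the proofs are below) =====
def Claim_equal_process_factorial : Prop := ∀ (expr : String), Dom_process_factorial expr → Pre_process_factorial expr → Spec_process_factorial expr (process_factorial expr)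

-- ===== LEMMAS AND PROOFS =====

-- the backward scan computes (length of expr[:j] with trailing digits stripped) - 1
theorem paScan_spec (cs : List Char) (j : Nat) (hj : j ≤ cs.length) :
    paScan cs ((j : Int) - 1) =
      (((cs.take j).reverse.dropWhile (fun c => PySem.Chars.isdigit c)).length : Int) - 1 := by
  induction j with
  | zero =>
    rw [paScan, dif_neg (by rintro ⟨h1, -⟩; omega)]
    simp
  | succ k ih =>
    have hk : k < cs.length := by omega
    have e : ((k + 1 : Nat) : Int) - 1 = (k : Int) := by omega
    rw [e, paScan]
    have hget : PySem.List.pyGetD cs ((k : Int)) ' ' = cs[k] := by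
      have := PySem.List.pyGetD_eq_getElem (xs := cs) (i := (k : Int)) (d := ' ')
        (by omega) (by exact_mod_cast hk)
      simpa using this
    have htake : (cs.take (k + 1)).reverse = cs[k] :: (cs.take k).reverse := by
      rw [List.take_add_one]
      simp [hk]
    by_cases hd : PySem.Chars.isdigit cs[k] = true
    · rw [dif_pos ⟨by omega, by rw [hget]; exact hd⟩]
      rw [ih (by omega), htake]
      simp [List.dropWhile, hd]
    · rw [dif_neg (by rintro ⟨-, hh⟩; rw [hget] at hh; exact hd hh)]
      rw [htake]
      simp [List.dropWhile, hd]
      omega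

-- the forward fold leaves the accumulator alone on a list of digits
theorem pbFold_digits (cs : List Char) (h : ∀ c ∈ cs, PySem.Chars.isdigit c = true)
    (b : Bool) : cs.foldl pbStep b = b := by
  induction cs generalizing b with
  | nil => rfl
  | cons c t ih =>
    have hc : PySem.Chars.isdigit c = true := h c (by simp)
    have hcne : ¬ c = '!' := by
      intro he; subst he; simp [PySem.Chars.isdigit] at hc
    rw [List.foldl_cons]
    rw [ih (fun x hx => h x (by simp [hx]))]
    simp [pbStep, hcne, hc]

theorem process_factorial_eq (expr : String) (hpre : Pre_process_factorial expr) :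
    process_factorial expr = process_factorial_alt expr := by
  unfold process_factorial process_factorial_alt
  by_cases hbang : PySem.Str.isIn "!" expr = true
  · -- '!' present: Pre_ forces the valid shape; both take the valid branch
    have hnB : ¬ (PySem.Str.isIn "!" expr = false) := by simp only [hbang]; simp
    rw [if_pos hbang, if_neg hnB]
    have hchars : PySem.Chars.isIn ['!'] expr.toList = true := by
      rw [show (['!'] : List Char) = "!".toList from rfl, ← PySem.Str.isIn_eq]
      exact hbang
    unfold Pre_process_factorial at hpre
    rcases hpre with h | ⟨hlen, hlast, hstr⟩
    · rw [hchars] at h; cases h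
    · -- decompose expr.toList = body ++ ['!']
      have hne : expr.toList ≠ [] := by
        intro h; rw [h] at hlen; simp at hlen
      rcases List.eq_nil_or_concat expr.toList with h | ⟨body, a, hconcat⟩
      · exact absurd h hne
      · simp only [List.concat_eq_append] at hconcat
        have ha : a = '!' := by
          rw [hconcat] at hlast; simp at hlast; exact hlast
        subst ha
        rw [hconcat] at hlen hstr ⊢
        have hdl : (body ++ ['!']).dropLast = body := by simp
        rw [hdl] at hstr
        simp only [PySem.List.slice_to_neg_one, hdl]
        have hblen : 0 < body.length := by
          have h := hlen
          simp at h
          omega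
        -- A's guard: expr[-1] == '!'
        have hlastD : PySem.List.pyGetD (body ++ ['!']) (-1) ' ' = '!' :=
          PySem.List.pyGetD_neg_one_append_singleton body '!' ' '
        have hc2 : 1 < (body ++ ['!']).length ∧
            PySem.List.pyGetD (body ++ ['!']) (-1) ' ' = '!' := ⟨hlen, hlastD⟩
        rw [if_pos hc2]
        -- the scan result
        have harg : (((body ++ ['!']).length : Int)) - 2 = (body.length : Int) - 1 := by
          simp; omega
        have hpa : paScan (body ++ ['!']) (((body ++ ['!']).length : Int) - 2) =
            ((body.reverse.dropWhile (fun c => PySem.Chars.isdigit c)).length : Int) - 1 := by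
          rw [harg]
          have := paScan_spec (body ++ ['!']) body.length (by simp)
          rwa [List.take_left] at this
        rcases hstr with hnil | hhead
        · -- stripped empty: body is all digits; A's scan ends at i = -1
          have hall : ∀ c ∈ body, PySem.Chars.isdigit c = true := by
            intro c hc
            exact List.dropWhile_eq_nil_iff.mp hnil c (by simpa using hc)
          have hok : body.foldl pbStep true = true := pbFold_digits body hall true
          rw [hpa, hnil]
          simp only [List.length_nil, Nat.cast_zero, zero_sub]
          rw [if_pos hlastD, if_pos ⟨hlen, hlastD, hok⟩]
          rw [PySem.List.slice_zero_start, PySem.List.slice_to_neg_one, hdl]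
        · -- stripped nonempty and its head (= last char before the digits) is '!'
          rcases hsr : body.reverse.dropWhile (fun c => PySem.Chars.isdigit c) with _ | ⟨c, t⟩
          · rw [hsr] at hhead; simp at hhead
          · have hc : c = '!' := by rw [hsr] at hhead; simpa using hhead
            subst hc
            rw [hpa, hsr]
            -- body = t.reverse ++ '!' :: digits
            have h1 : body.reverse
                = body.reverse.takeWhile (fun c => PySem.Chars.isdigit c) ++ ('!' :: t) := by
              conv_lhs => rw [← List.takeWhile_append_dropWhile
                (p := fun c => PySem.Chars.isdigit c) (l := body.reverse), hsr]
            have hbody : body = t.reverse ++ '!' ::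
                (body.reverse.takeWhile (fun c => PySem.Chars.isdigit c)).reverse := by
              calc body = body.reverse.reverse := by simp
                _ = (body.reverse.takeWhile (fun c => PySem.Chars.isdigit c)
                      ++ ('!' :: t)).reverse := by rw [← h1]
                _ = t.reverse ++ '!' ::
                    (body.reverse.takeWhile (fun c => PySem.Chars.isdigit c)).reverse := by
                  simp
            have hcat : body ++ ['!'] = t.reverse ++ '!' ::
                ((body.reverse.takeWhile (fun c => PySem.Chars.isdigit c)).reverse
                  ++ ['!']) := by
              conv_lhs => rw [hbody]
              simp
            have hidx : PySem.List.pyGetD (body ++ ['!'])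
                (((('!' :: t) : List Char)).length - 1 : Int) ' ' = '!' := by
              have e1 : (((('!' :: t) : List Char)).length : Int) - 1
                  = (t.reverse.length : Int) := by simp
              rw [e1, hcat]
              simp [PySem.List.pyGetD]
            rw [if_pos hidx]
            -- B's accumulator: fold over t.reverse, then '!' resets it to true,
            -- then the trailing digits leave it true
            have hok : body.foldl pbStep true = true := by
              conv_lhs => rw [hbody]
              rw [List.foldl_append, List.foldl_cons]
              have hstep : pbStep (t.reverse.foldl pbStep true) '!' = true := by
                simp [pbStep]
              rw [hstep]
              exact pbFold_digits _
                (fun x hx => List.mem_takeWhile_imp (by simpa using hx)) true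
            rw [if_pos ⟨hlen, hlastD, hok⟩]
            rw [PySem.List.slice_zero_start, PySem.List.slice_to_neg_one, hdl]
  · -- no '!': both return expr
    have hF : PySem.Str.isIn "!" expr = false := by
      simpa using hbang
    rw [if_neg hbang, if_pos hF]

-- ===== VERDICT (by name: the statement is the Claim_ definition above) =====
theorem process_factorial_spec : Claim_equal_process_factorial := by
  intro expr _hdom hpre
  exact process_factorial_eq expr hpre
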